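-- pv_equiv track=rewrite | github.com/chenIshi/game-distance2-coloring | src/game_coloring/graphs.py | make_caterpillar_graph
-- ===== SOURCE A (Python) =====
-- Graph = tuple[frozenset[int], ...]
--
-- def normalize_graph(adjacency: list[set[int]]) -> Graph:
--     return tuple(frozenset(neighbors) for neighbors in adjacency)
--
-- def make_caterpillar_graph(spine_length: int, leaf_counts: tuple[int, ...]) -> Graph:
--     if spine_length < 0:
--         raise ValueError("spine_length must be non-negative")
--     if len(leaf_counts) != spine_length:
--         raise ValueError("leaf_counts must have one entry per spine vertex")
--     if any(count < 0 for count in leaf_counts):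
--         raise ValueError("leaf counts must be non-negative")
--
--     total_vertices = spine_length + sum(leaf_counts)
--     adjacency = [set() for _ in range(total_vertices)]
--
--     for vertex in range(spine_length - 1):
--         adjacency[vertex].add(vertex + 1)
--         adjacency[vertex + 1].add(vertex)
--
--     next_leaf = spine_length
--     for spine_vertex, leaf_count in enumerate(leaf_counts):
--         for _ in range(leaf_count):
--             adjacency[spine_vertex].add(next_leaf)
--             adjacency[next_leaf].add(spine_vertex)
--             next_leaf += 1
--
--     return normalize_graph(adjacency)
-- ===== SOURCE B (Python) =====
-- def make_caterpillar_graph(spine_length, leaf_counts):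
--     if spine_length < 0:
--         raise ValueError("spine_length must be non-negative")
--     if len(leaf_counts) != spine_length:
--         raise ValueError("leaf_counts must have one entry per spine vertex")
--     if any(count < 0 for count in leaf_counts):
--         raise ValueError("leaf counts must be non-negative")
--
--     # build the undirected edge list of the caterpillar once
--     edges = [(i, i + 1) for i in range(spine_length - 1)]
--     next_leaf = spine_length
--     for i, count in enumerate(leaf_counts):
--         for _ in range(count):
--             edges.append((i, next_leaf))
--             next_leaf += 1
--
--     # orient every edge both ways; then each vertex's row is a scan of the arc list
--     arcs = [(v, u) for (u, v) in edges] + edges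
--     return tuple(frozenset(w for (u, w) in arcs if u == v) for v in range(next_leaf))
-- ===== Notes on version B (the rewrite author's own statement) =====
-- stated objective: alternative
-- what changed: B first materialises the caterpillar's undirected edge list, orients it into an arc list, and then derives each vertex's neighbour frozenset by scanning that arc list per vertex, instead of A's mutable adjacency array populated edge-by-edge across two insertion passes.
import Mathlib
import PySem

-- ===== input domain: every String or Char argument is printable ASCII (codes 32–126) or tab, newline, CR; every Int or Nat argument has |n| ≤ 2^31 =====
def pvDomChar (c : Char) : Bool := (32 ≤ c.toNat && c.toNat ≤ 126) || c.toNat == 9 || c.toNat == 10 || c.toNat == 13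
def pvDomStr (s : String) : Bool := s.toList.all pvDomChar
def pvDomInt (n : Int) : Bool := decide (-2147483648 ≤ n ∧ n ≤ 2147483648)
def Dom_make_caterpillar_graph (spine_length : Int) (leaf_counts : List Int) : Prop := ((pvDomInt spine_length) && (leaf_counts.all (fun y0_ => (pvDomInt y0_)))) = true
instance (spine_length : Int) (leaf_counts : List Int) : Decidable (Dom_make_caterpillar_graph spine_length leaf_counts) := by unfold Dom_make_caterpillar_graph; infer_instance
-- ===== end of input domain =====

-- B materialises the undirected edge list once, orients it into an arc list, and derives each
-- vertex's neighbour set by scanning that arc list, instead of A's mutable adjacency array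
-- populated edge-by-edge (alternative algorithm; not faster).

-- ===== PORT A =====
-- adjacency[i].add(x): Python set.add on the set stored at index i (indices used are ≥ 0, in range)
def pvAddAt (adj : List (List Int)) (i : Int) (x : Int) : List (List Int) :=
  adj.modify i.toNat (fun s => PySem.Set.add s x)

-- the three `raise ValueError` guards are excluded by Pre_; the port returns [] there
def make_caterpillar_graph (spine_length : Int) (leaf_counts : List Int) : List (List Int) :=
  if spine_length < 0 then []
  else if (leaf_counts.length : Int) ≠ spine_length then []
  else if leaf_counts.any (fun c => decide (c < 0)) then []
  else
    let total := spine_length + leaf_counts.sum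
    let adj0 : List (List Int) := List.replicate total.toNat []
    let adj1 := (PySem.List.pyRange 0 (spine_length - 1) 1).foldl
      (fun adj v => pvAddAt (pvAddAt adj v (v + 1)) (v + 1) v) adj0
    ((PySem.List.enumerate leaf_counts).foldl
      (fun st p => (PySem.List.pyRange 0 p.2 1).foldl
        (fun (st : List (List Int) × Int) _ => (pvAddAt (pvAddAt st.1 p.1 st.2) st.2 p.1, st.2 + 1)) st)
      (adj1, spine_length)).1

-- ===== PORT B =====
-- edge list built by the same guards, then arcs = reversed arcs ++ arcs, then one filter scan per
-- vertex; each frozenset(...) is PySem.Set.ofList of the scanned generator's list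
def make_caterpillar_graph_alt (spine_length : Int) (leaf_counts : List Int) : List (List Int) :=
  if spine_length < 0 then []
  else if (leaf_counts.length : Int) ≠ spine_length then []
  else if leaf_counts.any (fun c => decide (c < 0)) then []
  else
    let st := (PySem.List.enumerate leaf_counts).foldl
      (fun (st : List (Int × Int) × Int) p =>
        (PySem.List.pyRange 0 p.2 1).foldl
          (fun (st : List (Int × Int) × Int) _ => (st.1 ++ [(p.1, st.2)], st.2 + 1)) st)
      ((PySem.List.pyRange 0 (spine_length - 1) 1).map (fun i => (i, i + 1)), spine_length)
    let arcs := st.1.map (fun p => (p.2, p.1)) ++ st.1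
    (PySem.List.pyRange 0 st.2 1).map (fun v =>
      PySem.Set.ofList ((arcs.filter (fun p => p.1 == v)).map (fun p => p.2)))

-- ===== PRECONDITION & SPEC =====
-- exactly the inputs on which A returns normally (all three ValueError guards pass)
def Pre_make_caterpillar_graph (spine_length : Int) (leaf_counts : List Int) : Prop :=
  0 ≤ spine_length ∧ (leaf_counts.length : Int) = spine_length ∧ ∀ c ∈ leaf_counts, 0 ≤ c
instance (spine_length : Int) (leaf_counts : List Int) : Decidable (Pre_make_caterpillar_graph spine_length leaf_counts) := by unfold Pre_make_caterpillar_graph; infer_instance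

def pvWitness_make_caterpillar_graph : Int × List Int := (3, [2, 0, 1])

def Spec_make_caterpillar_graph (spine_length : Int) (leaf_counts : List Int) (out : List (List Int)) : Prop := out = make_caterpillar_graph_alt spine_length leaf_counts
instance (spine_length : Int) (leaf_counts : List Int) (out : List (List Int)) : Decidable (Spec_make_caterpillar_graph spine_length leaf_counts out) := by unfold Spec_make_caterpillar_graph; infer_instance

-- ===== CLAIM (what is proved, stated in full; the proofs are below) =====
def Claim_equal_make_caterpillar_graph : Prop := ∀ (spine_length : Int) (leaf_counts : List Int), Dom_make_caterpillar_graph spine_length leaf_counts → Pre_make_caterpillar_graph spine_length leaf_counts → Spec_make_caterpillar_graph spine_length leaf_counts (make_caterpillar_graph spine_length leaf_counts)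

-- ===== LEMMAS AND PROOFS =====

theorem pvSet_add_notmem (l : List Int) (x : Int) (h : x ∉ l) :
    PySem.Set.add l x = l ++ [x] := by
  simp [PySem.Set.add, PySem.Set.contains, h]

theorem pvModify_boundary {α : Type} (l t : List α) (a : α) (g : α → α) :
    (l ++ a :: t).modify l.length g = l ++ g a :: t := by
  induction l with
  | nil => simp [List.modify]
  | cons b l ih => simpa [List.modify_cons] using ih

theorem pvModify_map_pyRange (N j : Int) (f : Int → List Int) (g : List Int → List Int)
    (t : List (List Int)) (h0 : 0 ≤ j) (hN : j < N) :
    (((PySem.List.pyRange 0 N 1).map f ++ t).modify j.toNat g) =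
      (PySem.List.pyRange 0 N 1).map (fun i => if i = j then g (f i) else f i) ++ t := by
  have hlen : (PySem.List.pyRange 0 N 1).length = N.toNat := by
    simp [PySem.List.length_pyRange_one]
  apply List.ext_getElem
  · simp [List.length_modify]
  · intro k h1 h2
    rw [List.getElem_modify]
    by_cases hk : k < N.toNat
    · rw [List.getElem_append_left (by simpa [hlen] using hk),
          List.getElem_append_left (by simpa [hlen] using hk),
          List.getElem_map, List.getElem_map, PySem.List.getElem_pyRange_one]
      by_cases hjk : j.toNat = k
      · have hkj : ((0:Int) + (k:Int)) = j := by omega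
        simp [hjk, hkj]
      · have hkj : ¬((k:Int) = j) := by omega
        simp [hjk, hkj]
    · have hk' : (List.map f (PySem.List.pyRange 0 N 1)).length ≤ k := by
        simpa [hlen] using Nat.le_of_not_lt hk
      rw [List.getElem_append_right hk',
          List.getElem_append_right (by simpa [hlen] using Nat.le_of_not_lt hk),
          if_neg (by omega)]
      simp [hlen]

def pvEdgeUpto (k i : Int) : List Int :=
  (if 0 < i ∧ i ≤ k then [i - 1] else []) ++ (if i < k then [i + 1] else [])

theorem pvEdges (N : Int) (m : Nat) : ∀ (j : Nat), (j : Int) ≤ N - 1 →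
    (PySem.List.pyRange 0 (j : Int) 1).foldl (fun adj v => pvAddAt (pvAddAt adj v (v + 1)) (v + 1) v)
      ((PySem.List.pyRange 0 N 1).map (fun _ => []) ++ List.replicate m []) =
    (PySem.List.pyRange 0 N 1).map (pvEdgeUpto (j : Int)) ++ List.replicate m [] := by
  intro j
  induction j with
  | zero =>
    intro _
    rw [show ((0:Nat):Int) = 0 from rfl, PySem.List.pyRange_one_eq_nil (le_refl 0), List.foldl_nil]
    congr 1
    apply List.map_congr_left
    intro i hi
    rw [PySem.List.mem_pyRange_one] at hi
    simp only [pvEdgeUpto]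
    rw [if_neg (by omega), if_neg (by omega)]
    simp
  | succ j ih =>
    intro h
    have hcast : (((j+1:Nat)):Int) = (j:Int) + 1 := by push_cast; ring
    rw [hcast] at h ⊢
    rw [PySem.List.pyRange_one_succ_right (Int.natCast_nonneg j), List.foldl_append,
        ih (by omega), List.foldl_cons, List.foldl_nil]
    simp only [pvAddAt]
    rw [pvModify_map_pyRange N (j:Int) _ _ _ (by omega) (by omega),
        pvModify_map_pyRange N ((j:Int)+1) _ _ _ (by omega) (by omega)]
    congr 1
    apply List.map_congr_left
    intro i hi
    rw [PySem.List.mem_pyRange_one] at hi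
    obtain ⟨hi0, hiN⟩ := hi
    simp only [pvEdgeUpto]
    split_ifs <;>
      first
        | (exfalso; omega)
        | rfl
        | (simp_all [PySem.Set.add, PySem.Set.contains] <;> omega)

theorem pvLeafSum_nonneg (cs : List Int) (h : ∀ c ∈ cs, 0 ≤ c) : 0 ≤ cs.sum := by
  induction cs with
  | nil => simp
  | cons c cs ih =>
    simp only [List.sum_cons]
    have := h c (by simp)
    have := ih (fun c hc => h c (by simp [hc]))
    omega

theorem pvAddAt_at (X : List (List Int)) (a : List Int) (T : List (List Int)) (i x : Int)
    (hi : i = (X.length : Int)) :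
    pvAddAt (X ++ a :: T) i x = X ++ (PySem.Set.add a x) :: T := by
  subst hi
  simp only [pvAddAt, Int.toNat_natCast]
  exact pvModify_boundary X T a _

theorem pvInner (k : Nat) : ∀ (X₀ Y Lf : List (List Int)) (y : List Int) (r : Nat),
    (∀ x ∈ y, x < ((X₀.length + (Y.length + 1) + Lf.length : Nat) : Int)) → k ≤ r →
    (PySem.List.pyRange 0 (k : Int) 1).foldl
      (fun (st : List (List Int) × Int) _ =>
        (pvAddAt (pvAddAt st.1 (X₀.length : Int) st.2) st.2 (X₀.length : Int), st.2 + 1))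
      (X₀ ++ y :: Y ++ Lf ++ List.replicate r [], ((X₀.length + (Y.length + 1) + Lf.length : Nat) : Int))
    = (X₀ ++ (y ++ PySem.List.pyRange ((X₀.length + (Y.length + 1) + Lf.length : Nat) : Int)
          (((X₀.length + (Y.length + 1) + Lf.length : Nat) : Int) + k) 1) :: Y
        ++ (Lf ++ List.replicate k [(X₀.length : Int)]) ++ List.replicate (r - k) [],
        ((X₀.length + (Y.length + 1) + Lf.length : Nat) : Int) + k) := by
  induction k with
  | zero =>
    intro X₀ Y Lf y r hy hk
    simp [PySem.List.pyRange_one_eq_nil (le_refl (0:Int))]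
  | succ k ih =>
    intro X₀ Y Lf y r hy hk
    have hcast : (((k+1:Nat)):Int) = (k:Int) + 1 := by push_cast; ring
    rw [hcast, PySem.List.pyRange_one_succ_right (Int.natCast_nonneg k), List.foldl_append,
        ih X₀ Y Lf y r hy (by omega), List.foldl_cons, List.foldl_nil]
    set nl : Int := ((X₀.length + (Y.length + 1) + Lf.length : Nat) : Int) with hnl
    simp only [List.cons_append, List.append_assoc]
    have hnm : (nl + (k:Int)) ∉ y ++ PySem.List.pyRange nl (nl + (k:Int)) 1 := by
      intro hmem
      rcases List.mem_append.mp hmem with hmem | hmem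
      · have := hy _ hmem; omega
      · rw [PySem.List.mem_pyRange_one] at hmem; omega
    rw [pvAddAt_at X₀ _ _ _ _ rfl, pvSet_add_notmem _ _ hnm, List.append_assoc,
        ← PySem.List.pyRange_one_succ_right (by omega : nl ≤ nl + (k:Int))]
    have hrk : r - k = (r - (k+1)) + 1 := by omega
    rw [hrk, List.replicate_succ]
    have hre : X₀ ++ (y ++ PySem.List.pyRange nl (nl + (k:Int) + 1) 1) ::
          (Y ++ (Lf ++ (List.replicate k [(X₀.length : Int)] ++ ([] :: List.replicate (r - (k+1)) []))))
        = (X₀ ++ (y ++ PySem.List.pyRange nl (nl + (k:Int) + 1) 1) ::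
            (Y ++ (Lf ++ List.replicate k [(X₀.length : Int)]))) ++ ([] :: List.replicate (r - (k+1)) []) := by
      simp [List.append_assoc]
    have hlen2 : nl + (k:Int)
        = (((X₀ ++ (y ++ PySem.List.pyRange nl (nl + (k:Int) + 1) 1) ::
            (Y ++ (Lf ++ List.replicate k [(X₀.length : Int)]))).length : Nat) : Int) := by
      simp [hnl]; ring
    rw [hre, pvAddAt_at _ _ _ _ _ hlen2]
    rw [show PySem.Set.add ([] : List Int) (X₀.length : Int) = [(X₀.length : Int)] from rfl]
    refine Prod.ext ?_ ?_
    · simp [List.append_assoc, List.replicate_succ', List.cons_append]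
      ring_nf
    · simp only []
      ring

def pvUpd : List (List Int) → List Int → Int → List (List Int)
  | y :: Y, c :: cs, nl => (y ++ PySem.List.pyRange nl (nl + c) 1) :: pvUpd Y cs (nl + c)
  | Y, _, _ => Y

def pvLeafL : List Int → Int → List (List Int)
  | [], _ => []
  | c :: cs, s => (PySem.List.pyRange 0 c 1).map (fun _ => ([s] : List Int)) ++ pvLeafL cs (s + 1)

theorem pvOuter : ∀ (cs : List Int) (X₀ Y Lf : List (List Int)) (r : Nat),
    Y.length = cs.length → (∀ c ∈ cs, 0 ≤ c) →
    (∀ l ∈ X₀ ++ Y ++ Lf, ∀ x ∈ l, x < ((X₀.length + Y.length + Lf.length : Nat) : Int)) →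
    (cs.sum).toNat ≤ r →
    (PySem.List.enumerate cs (X₀.length : Int)).foldl
      (fun st p => (PySem.List.pyRange 0 p.2 1).foldl
        (fun (st : List (List Int) × Int) _ => (pvAddAt (pvAddAt st.1 p.1 st.2) st.2 p.1, st.2 + 1)) st)
      (X₀ ++ Y ++ Lf ++ List.replicate r [], ((X₀.length + Y.length + Lf.length : Nat) : Int))
    = (X₀ ++ pvUpd Y cs ((X₀.length + Y.length + Lf.length : Nat) : Int)
        ++ (Lf ++ pvLeafL cs (X₀.length : Int)) ++ List.replicate (r - (cs.sum).toNat) [],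
        ((X₀.length + Y.length + Lf.length : Nat) : Int) + cs.sum) := by
  intro cs
  induction cs with
  | nil =>
    intro X₀ Y Lf r hlen hpos hbnd hsum
    have hY : Y = [] := List.eq_nil_of_length_eq_zero (by simpa using hlen)
    subst hY
    simp [pvUpd, pvLeafL, PySem.List.enumerate]
  | cons c cs ihcs =>
    intro X₀ Y Lf r hlen hpos hbnd hsum
    obtain ⟨y, Y', rfl⟩ : ∃ y Y', Y = y :: Y' := by
      cases Y with
      | nil => simp at hlen
      | cons a b => exact ⟨a, b, rfl⟩
    rw [PySem.List.enumerate_cons, List.foldl_cons]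
    have hc : 0 ≤ c := hpos c (by simp)
    have hsnn : 0 ≤ cs.sum := by
      apply pvLeafSum_nonneg; intro d hd; exact hpos d (by simp [hd])
    have hbndy : ∀ x ∈ y, x < ((X₀.length + (Y'.length + 1) + Lf.length : Nat) : Int) := by
      intro x hx
      have := hbnd y (by simp) x hx
      simp at this ⊢
      omega
    have hsum' : (c + cs.sum).toNat ≤ r := by simpa using hsum
    have hle : c.toNat ≤ r := by omega
    have e1 := pvInner c.toNat X₀ Y' Lf y r hbndy hle
    rw [show ((c.toNat : Nat) : Int) = c from Int.toNat_of_nonneg hc] at e1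
    rw [show ((X₀.length + (y :: Y').length + Lf.length : Nat) : Int)
          = ((X₀.length + (Y'.length + 1) + Lf.length : Nat) : Int) by simp]
    rw [show X₀ ++ (y :: Y') ++ Lf ++ List.replicate r []
          = X₀ ++ y :: Y' ++ Lf ++ List.replicate r [] by simp]
    rw [e1]
    set nl : Int := ((X₀.length + (Y'.length + 1) + Lf.length : Nat) : Int) with hnl
    set u : List Int := y ++ PySem.List.pyRange nl (nl + c) 1 with hu
    have hbndall : ∀ l ∈ X₀ ++ y :: Y' ++ Lf, ∀ x ∈ l, x < nl := by
      intro l hl x hx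
      have := hbnd l hl x hx
      simp only [hnl, List.length_cons] at this ⊢
      convert this using 3
      try omega
    have hnl' : (((X₀ ++ [u]).length + Y'.length
          + (Lf ++ List.replicate c.toNat [(X₀.length : Int)]).length : Nat) : Int) = nl + c := by
      simp only [hnl, List.length_append, List.length_cons, List.length_replicate,
        List.length_nil]
      push_cast [Int.toNat_of_nonneg hc]
      ring
    have hbnd' : ∀ l ∈ (X₀ ++ [u]) ++ Y' ++ (Lf ++ List.replicate c.toNat [(X₀.length : Int)]),
        ∀ x ∈ l, x < (((X₀ ++ [u]).length + Y'.length
          + (Lf ++ List.replicate c.toNat [(X₀.length : Int)]).length : Nat) : Int) := by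
      rw [hnl']
      intro l hl x hx
      rcases List.mem_append.mp hl with hl | hl
      · rcases List.mem_append.mp hl with hl | hl
        · rcases List.mem_append.mp hl with hl | hl
          · have := hbndall l (by simp [hl]) x hx; omega
          · have hlu : l = u := by simpa using hl
            subst hlu
            rcases List.mem_append.mp (hu ▸ hx) with hx' | hx'
            · have := hbndall y (by simp) x hx'; omega
            · rw [PySem.List.mem_pyRange_one] at hx'; omega
        · have := hbndall l (by simp [hl]) x hx; omega
      · rcases List.mem_append.mp hl with hl | hl
        · have := hbndall l (by simp [hl]) x hx; omega
        · have hlx : l = [(X₀.length : Int)] := List.eq_of_mem_replicate hl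
          subst hlx
          have hxx : x = (X₀.length : Int) := by simpa using hx
          have : (X₀.length : Int) < nl := by rw [hnl]; push_cast; omega
          omega
    have e2 := ihcs (X₀ ++ [u]) Y' (Lf ++ List.replicate c.toNat [(X₀.length : Int)])
      (r - c.toNat) (by simpa using hlen) (fun d hd => hpos d (by simp [hd])) hbnd' (by omega)
    rw [hnl'] at e2
    rw [show (((X₀ ++ [u]).length : Nat) : Int) = (X₀.length : Int) + 1 by simp] at e2
    rw [show X₀ ++ u :: Y' ++ (Lf ++ List.replicate c.toNat [(X₀.length : Int)])
          ++ List.replicate (r - c.toNat) []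
        = (X₀ ++ [u]) ++ Y' ++ (Lf ++ List.replicate c.toNat [(X₀.length : Int)])
          ++ List.replicate (r - c.toNat) [] from by simp]
    rw [e2]
    refine Prod.ext ?_ ?_
    · simp only [pvUpd, pvLeafL, hu]
      rw [show (PySem.List.pyRange 0 c 1).map (fun _ => ([(X₀.length : Int)] : List Int))
            = List.replicate c.toNat [(X₀.length : Int)] by
          rw [List.map_const']
          congr 1
          simp [PySem.List.length_pyRange_one]]
      rw [show r - ((c :: cs).sum).toNat = r - c.toNat - cs.sum.toNat by simp; omega]
      simp [List.append_assoc]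
    · simp only []
      simp
      ring

theorem pvUpd_length : ∀ (cs : List Int) (Y : List (List Int)) (nl : Int),
    Y.length = cs.length → (pvUpd Y cs nl).length = Y.length := by
  intro cs
  induction cs with
  | nil => intro Y nl h; cases Y <;> simp [pvUpd]
  | cons c cs ih =>
    intro Y nl h
    cases Y with
    | nil => simp [pvUpd]
    | cons y Y => simp [pvUpd, ih Y (nl + c) (by simpa using h)]

theorem pvUpd_getElem : ∀ (cs : List Int) (Y : List (List Int)) (nl : Int) (k : Nat)
    (hlen : Y.length = cs.length) (h : k < cs.length),
    (pvUpd Y cs nl)[k]'(by rw [pvUpd_length cs Y nl hlen, hlen]; exact h)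
      = Y[k]'(by rw [hlen]; exact h) ++
        PySem.List.pyRange (nl + (cs.take k).sum) (nl + (cs.take k).sum + cs[k]) 1 := by
  intro cs
  induction cs with
  | nil => intro Y nl k hlen h; simp at h
  | cons c cs ih =>
    intro Y nl k hlen h
    cases Y with
    | nil => simp at hlen
    | cons y Y =>
      cases k with
      | zero => simp [pvUpd]
      | succ k =>
        have hk : k < cs.length := by simpa using h
        simp only [pvUpd, List.getElem_cons_succ, List.take_succ_cons, List.sum_cons]
        rw [ih Y (nl + c) k (by simpa using hlen) hk]
        ring_nf

-- ===== B-side helpers =====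

-- the leaf arcs B's loop appends: block i (spine vertex j+i) gets leaves nl+…
def pvLeafA : List Int → Int → Int → List (Int × Int)
  | [], _, _ => []
  | c :: cs, j, nl =>
      (PySem.List.pyRange nl (nl + c) 1).map (fun l => (j, l)) ++ pvLeafA cs (j + 1) (nl + c)

theorem pvBuildInner (k : Nat) : ∀ (acc : List (Int × Int)) (j nl : Int),
    (PySem.List.pyRange 0 (k : Int) 1).foldl
      (fun (st : List (Int × Int) × Int) _ => (st.1 ++ [(j, st.2)], st.2 + 1)) (acc, nl)
    = (acc ++ (PySem.List.pyRange nl (nl + k) 1).map (fun l => (j, l)), nl + k) := by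
  induction k with
  | zero =>
    intro acc j nl
    simp [PySem.List.pyRange_one_eq_nil (le_refl (0:Int)),
      PySem.List.pyRange_one_eq_nil (by omega : nl + ((0:Nat):Int) ≤ nl)]
  | succ k ih =>
    intro acc j nl
    have hcast : (((k+1:Nat)):Int) = (k:Int) + 1 := by push_cast; ring
    rw [hcast, PySem.List.pyRange_one_succ_right (Int.natCast_nonneg k), List.foldl_append,
        ih acc j nl, List.foldl_cons, List.foldl_nil]
    rw [show nl + ((k:Int) + 1) = (nl + (k:Int)) + 1 by ring,
        PySem.List.pyRange_one_succ_right (by omega : nl ≤ nl + (k:Int))]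
    simp [List.append_assoc]

theorem pvBuildOuter : ∀ (cs : List Int) (acc : List (Int × Int)) (j nl : Int),
    (∀ c ∈ cs, 0 ≤ c) →
    (PySem.List.enumerate cs j).foldl
      (fun (st : List (Int × Int) × Int) p =>
        (PySem.List.pyRange 0 p.2 1).foldl
          (fun (st : List (Int × Int) × Int) _ => (st.1 ++ [(p.1, st.2)], st.2 + 1)) st)
      (acc, nl)
    = (acc ++ pvLeafA cs j nl, nl + cs.sum) := by
  intro cs
  induction cs with
  | nil => intro acc j nl _; simp [PySem.List.enumerate, pvLeafA]
  | cons c cs ih =>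
    intro acc j nl hpos
    have hc : 0 ≤ c := hpos c (by simp)
    rw [PySem.List.enumerate_cons, List.foldl_cons]
    have e1 := pvBuildInner c.toNat acc j nl
    rw [show ((c.toNat : Nat) : Int) = c from Int.toNat_of_nonneg hc] at e1
    rw [e1, ih _ (j + 1) (nl + c) (fun d hd => hpos d (by simp [hd]))]
    simp [pvLeafA, List.append_assoc]
    ring

theorem pvFilterRange (a b v : Int) :
    (PySem.List.pyRange a b 1).filter (fun i => i == v)
      = if a ≤ v ∧ v < b then [v] else [] := by
  by_cases h : a ≤ v ∧ v < b
  · rw [if_pos h, PySem.List.pyRange_one_append a v b h.1 (by omega),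
        PySem.List.pyRange_one_cons (show v < b by omega), List.filter_append, List.filter_cons]
    have h1 : (PySem.List.pyRange a v 1).filter (fun i => i == v) = [] := by
      apply List.filter_eq_nil_iff.mpr
      intro i hi
      rw [PySem.List.mem_pyRange_one] at hi
      simp
      omega
    have h2 : (PySem.List.pyRange (v + 1) b 1).filter (fun i => i == v) = [] := by
      apply List.filter_eq_nil_iff.mpr
      intro i hi
      rw [PySem.List.mem_pyRange_one] at hi
      simp
      omega
    rw [h1, h2]
    simp
  · rw [if_neg h]
    apply List.filter_eq_nil_iff.mpr
    intro i hi
    rw [PySem.List.mem_pyRange_one] at hi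
    simp
    omega

theorem pvLeafA_mem : ∀ (cs : List Int) (j nl : Int) (p : Int × Int),
    (∀ c ∈ cs, 0 ≤ c) → p ∈ pvLeafA cs j nl →
    j ≤ p.1 ∧ p.1 < j + cs.length ∧ nl ≤ p.2 := by
  intro cs
  induction cs with
  | nil => intro j nl p _ hp; simp [pvLeafA] at hp
  | cons c cs ih =>
    intro j nl p hpos hp
    have hc : 0 ≤ c := hpos c (by simp)
    rcases List.mem_append.mp hp with hp | hp
    · obtain ⟨l, hl, rfl⟩ := List.mem_map.mp hp
      rw [PySem.List.mem_pyRange_one] at hl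
      simp
      omega
    · have := ih (j + 1) (nl + c) p (fun d hd => hpos d (by simp [hd])) hp
      simp
      omega

theorem pvLeafA_filter_fst : ∀ (cs : List Int) (j nl : Int) (k : Nat) (hk : k < cs.length),
    (∀ c ∈ cs, 0 ≤ c) →
    (pvLeafA cs j nl).filter (fun p => p.1 == j + (k : Int))
      = (PySem.List.pyRange (nl + (cs.take k).sum) (nl + (cs.take k).sum + cs[k]) 1).map
          (fun l => (j + (k : Int), l)) := by
  intro cs
  induction cs with
  | nil => intro j nl k hk _; simp at hk
  | cons c cs ih =>
    intro j nl k hk hpos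
    rw [show pvLeafA (c :: cs) j nl
          = (PySem.List.pyRange nl (nl + c) 1).map (fun l => (j, l)) ++ pvLeafA cs (j + 1) (nl + c)
          from rfl,
        List.filter_append]
    cases k with
    | zero =>
      have h1 : ((PySem.List.pyRange nl (nl + c) 1).map (fun l => (j, l))).filter
          (fun p => p.1 == j + ((0:Nat):Int))
          = (PySem.List.pyRange nl (nl + c) 1).map (fun l => (j, l)) := by
        apply List.filter_eq_self.mpr
        intro p hp
        obtain ⟨l, _, rfl⟩ := List.mem_map.mp hp
        simp
      have h2 : (pvLeafA cs (j + 1) (nl + c)).filter (fun p => p.1 == j + ((0:Nat):Int)) = [] := by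
        apply List.filter_eq_nil_iff.mpr
        intro p hp
        have := pvLeafA_mem cs (j + 1) (nl + c) p (fun d hd => hpos d (by simp [hd])) hp
        simp
        omega
      rw [h1, h2, List.append_nil]
      simp
    | succ k =>
      have h1 : ((PySem.List.pyRange nl (nl + c) 1).map (fun l => (j, l))).filter
          (fun p => p.1 == j + (((k+1:Nat)):Int)) = [] := by
        apply List.filter_eq_nil_iff.mpr
        intro p hp
        obtain ⟨l, _, rfl⟩ := List.mem_map.mp hp
        simp
        omega
      have hpred : (fun (p : Int × Int) => p.1 == j + (((k+1:Nat)):Int))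
          = (fun (p : Int × Int) => p.1 == (j + 1) + ((k:Nat):Int)) := by
        funext p
        have : j + (((k+1:Nat)):Int) = (j + 1) + ((k:Nat):Int) := by push_cast; ring
        rw [this]
      rw [h1, List.nil_append, hpred,
          ih (j + 1) (nl + c) k (by simpa using hk) (fun d hd => hpos d (by simp [hd]))]
      have e1 : (j + 1) + ((k:Nat):Int) = j + (((k+1:Nat)):Int) := by push_cast; ring
      have e2 : (nl + c) + (cs.take k).sum = nl + (((c :: cs).take (k+1)).sum) := by
        simp; ring
      rw [e1, e2]
      simp

theorem pvLeafRows : ∀ (cs : List Int) (j nl : Int), (∀ c ∈ cs, 0 ≤ c) →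
    (PySem.List.pyRange nl (nl + cs.sum) 1).map
      (fun v => PySem.Set.ofList
        ((((pvLeafA cs j nl).map (fun p => (p.2, p.1))).filter (fun p => p.1 == v)).map
          (fun p => p.2)))
      = pvLeafL cs j := by
  intro cs
  induction cs with
  | nil => intro j nl _; simp [pvLeafA, pvLeafL, PySem.List.pyRange_one_eq_nil (by simp : nl + ([]:List Int).sum ≤ nl)]
  | cons c cs ih =>
    intro j nl hpos
    have hc : 0 ≤ c := hpos c (by simp)
    have hs : 0 ≤ cs.sum := pvLeafSum_nonneg cs (fun d hd => hpos d (by simp [hd]))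
    rw [show nl + (c :: cs).sum = (nl + c) + cs.sum by simp; ring,
        PySem.List.pyRange_one_append nl (nl + c) ((nl + c) + cs.sum) (by omega) (by omega),
        List.map_append]
    have hhead : ∀ v, ((((pvLeafA (c :: cs) j nl).map (fun p => (p.2, p.1))).filter
          (fun p => p.1 == v)).map (fun p => (p.2 : Int)))
        = ((((PySem.List.pyRange nl (nl + c) 1).filter (fun l => l == v)).map
            (fun l => (j : Int)))
          ++ (((pvLeafA cs (j + 1) (nl + c)).map (fun p => (p.2, p.1))).filter
              (fun p => p.1 == v)).map (fun p => p.2)) := by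
      intro v
      rw [show pvLeafA (c :: cs) j nl
            = (PySem.List.pyRange nl (nl + c) 1).map (fun l => (j, l)) ++ pvLeafA cs (j + 1) (nl + c)
            from rfl,
          List.map_append, List.filter_append, List.map_append, List.map_map, List.filter_map,
          List.map_map]
      rfl
    have hA' : (PySem.List.pyRange nl (nl + c) 1).map
        (fun v => PySem.Set.ofList
          ((((pvLeafA (c :: cs) j nl).map (fun p => (p.2, p.1))).filter (fun p => p.1 == v)).map
            (fun p => p.2)))
        = (PySem.List.pyRange nl (nl + c) 1).map (fun _ => ([j] : List Int)) := by
      apply List.map_congr_left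
      intro v hv
      rw [PySem.List.mem_pyRange_one] at hv
      rw [hhead v, pvFilterRange nl (nl + c) v, if_pos (by omega)]
      have h2 : ((pvLeafA cs (j + 1) (nl + c)).map (fun p => (p.2, p.1))).filter
          (fun p => p.1 == v) = [] := by
        apply List.filter_eq_nil_iff.mpr
        intro p hp
        obtain ⟨q, hq, rfl⟩ := List.mem_map.mp hp
        have := pvLeafA_mem cs (j + 1) (nl + c) q (fun d hd => hpos d (by simp [hd])) hq
        simp
        omega
      rw [h2]
      simp [PySem.Set.ofList, PySem.Set.add, PySem.Set.contains]
    have hA : (PySem.List.pyRange nl (nl + c) 1).map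
        (fun v => PySem.Set.ofList
          ((((pvLeafA (c :: cs) j nl).map (fun p => (p.2, p.1))).filter (fun p => p.1 == v)).map
            (fun p => p.2)))
        = (PySem.List.pyRange 0 c 1).map (fun _ => ([j] : List Int)) := by
      rw [hA', List.map_const', List.map_const']
      congr 1
      simp [PySem.List.length_pyRange_one]
    have hB : (PySem.List.pyRange (nl + c) ((nl + c) + cs.sum) 1).map
        (fun v => PySem.Set.ofList
          ((((pvLeafA (c :: cs) j nl).map (fun p => (p.2, p.1))).filter (fun p => p.1 == v)).map
            (fun p => p.2)))
        = pvLeafL cs (j + 1) := by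
      rw [← ih (j + 1) (nl + c) (fun d hd => hpos d (by simp [hd]))]
      apply List.map_congr_left
      intro v hv
      rw [PySem.List.mem_pyRange_one] at hv
      rw [hhead v, pvFilterRange nl (nl + c) v, if_neg (by omega)]
      simp
    rw [hA, hB]
    rfl

theorem pvNodup2 (v a b : Int) (h1 : 1 ≤ v) (h2 : v + 1 < a) :
    ((v - 1) :: (v + 1) :: PySem.List.pyRange a b 1).Nodup := by
  simp [List.nodup_cons, PySem.List.mem_pyRange_one, PySem.List.nodup_pyRange_one] <;> omega

theorem pvNodupL (v a b : Int) (h : v < a) :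
    ((v - 1) :: PySem.List.pyRange a b 1).Nodup := by
  simp [List.nodup_cons, PySem.List.mem_pyRange_one, PySem.List.nodup_pyRange_one] <;> omega

theorem pvNodupR (v a b : Int) (h : v + 1 < a) :
    ((v + 1) :: PySem.List.pyRange a b 1).Nodup := by
  simp [List.nodup_cons, PySem.List.mem_pyRange_one, PySem.List.nodup_pyRange_one] <;> omega

-- A's result, described row by row
def pvY (cs : List Int) : List (List Int) :=
  (PySem.List.pyRange 0 (cs.length : Int) 1).map (pvEdgeUpto ((cs.length - 1 : Nat) : Int))

theorem pvA_desc (cs : List Int) (hpos : ∀ c ∈ cs, 0 ≤ c) (hn : cs.length ≠ 0) :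
    make_caterpillar_graph (cs.length : Int) cs
      = pvUpd (pvY cs) cs (cs.length : Int) ++ pvLeafL cs 0 := by
  have hsnn : 0 ≤ cs.sum := pvLeafSum_nonneg cs hpos
  have hany : ¬(cs.any (fun c => decide (c < 0)) = true) := by
    simp only [List.any_eq_true, decide_eq_true_eq]
    rintro ⟨c, hc, hlt⟩
    exact absurd (hpos c hc) (by omega)
  unfold make_caterpillar_graph
  rw [if_neg (by omega), if_neg (fun hne => hne rfl), if_neg hany]
  simp only []
  have hrep : List.replicate ((cs.length : Int) + cs.sum).toNat ([] : List Int)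
      = (PySem.List.pyRange 0 (cs.length : Int) 1).map (fun _ => ([] : List Int))
        ++ List.replicate cs.sum.toNat [] := by
    rw [List.map_const', PySem.List.length_pyRange_one, ← List.replicate_add]
    congr 1
    omega
  have hm1 : ((cs.length : Int) - 1) = ((cs.length - 1 : Nat) : Int) := by omega
  rw [hrep, hm1, pvEdges (cs.length : Int) cs.sum.toNat (cs.length - 1) (by omega)]
  have hYlen : (pvY cs).length = cs.length := by
    simp [pvY, PySem.List.length_pyRange_one]
  have hYmem : ∀ l ∈ pvY cs, ∀ x ∈ l, x < (cs.length : Int) := by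
    intro l hl x hx
    rw [pvY, List.mem_map] at hl
    obtain ⟨i, hi, rfl⟩ := hl
    rw [PySem.List.mem_pyRange_one] at hi
    simp only [pvEdgeUpto, List.mem_append] at hx
    rcases hx with hx | hx <;> [skip; skip] <;>
      · split_ifs at hx with hcond
        · simp at hx; omega
        · simp at hx
  have hbnd : ∀ l ∈ ([] : List (List Int)) ++ pvY cs ++ ([] : List (List Int)), ∀ x ∈ l,
      x < (((([] : List (List Int)).length + (pvY cs).length
        + ([] : List (List Int)).length : Nat)) : Int) := by
    intro l hl x hx
    have := hYmem l (by simpa using hl) x hx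
    simp only [List.length_nil, Nat.zero_add, Nat.add_zero, hYlen]
    omega
  have e3 := pvOuter cs [] (pvY cs) [] cs.sum.toNat hYlen hpos hbnd (le_refl _)
  simp only [List.length_nil, Nat.zero_add, Nat.add_zero, hYlen, List.nil_append,
    List.append_nil, Nat.cast_zero, Nat.sub_self, List.replicate_zero] at e3
  rw [show pvY cs = (PySem.List.pyRange 0 ((cs.length : Nat) : Int) 1).map
        (pvEdgeUpto ((cs.length - 1 : Nat) : Int)) from rfl] at e3
  rw [e3]
  simp [pvY]

theorem pvB_desc (cs : List Int) (hpos : ∀ c ∈ cs, 0 ≤ c) (hn : cs.length ≠ 0) :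
    make_caterpillar_graph_alt (cs.length : Int) cs
      = pvUpd (pvY cs) cs (cs.length : Int) ++ pvLeafL cs 0 := by
  have hsnn : 0 ≤ cs.sum := pvLeafSum_nonneg cs hpos
  have hany : ¬(cs.any (fun c => decide (c < 0)) = true) := by
    simp only [List.any_eq_true, decide_eq_true_eq]
    rintro ⟨c, hc, hlt⟩
    exact absurd (hpos c hc) (by omega)
  unfold make_caterpillar_graph_alt
  rw [if_neg (by omega), if_neg (fun hne => hne rfl), if_neg hany]
  simp only []
  set s : Int := (cs.length : Int) with hs
  rw [pvBuildOuter cs _ 0 s hpos]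
  set E : List (Int × Int) := (PySem.List.pyRange 0 (s - 1) 1).map (fun i => (i, i + 1)) with hE
  set LA : List (Int × Int) := pvLeafA cs 0 s with hLA
  rw [show ((E ++ LA, s + cs.sum) : List (Int × Int) × Int).1 = E ++ LA from rfl,
      show ((E ++ LA, s + cs.sum) : List (Int × Int) × Int).2 = s + cs.sum from rfl]
  -- the per-vertex row as four filtered segments
  have hrow : ∀ v : Int,
      ((((E ++ LA).map (fun p => (p.2, p.1)) ++ (E ++ LA)).filter (fun p => p.1 == v)).map
        (fun p => (p.2 : Int)))
      = (((PySem.List.pyRange 0 (s - 1) 1).filter (fun i => i + 1 == v)).map (fun i => (i : Int)))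
        ++ ((LA.map (fun p => (p.2, p.1))).filter (fun p => p.1 == v)).map (fun p => p.2)
        ++ (((PySem.List.pyRange 0 (s - 1) 1).filter (fun i => i == v)).map (fun i => i + 1))
        ++ (LA.filter (fun p => p.1 == v)).map (fun p => p.2) := by
    intro v
    simp only [hE, List.map_append, List.filter_append, List.map_map, List.filter_map,
      List.append_assoc]
    rfl
  rw [show s + cs.sum = s + cs.sum from rfl,
      PySem.List.pyRange_one_append 0 s (s + cs.sum) (by omega) (by omega), List.map_append]
  congr 1
  · -- spine rows
    apply List.ext_getElem
    · rw [pvUpd_length cs (pvY cs) s (by simp [pvY, PySem.List.length_pyRange_one])]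
      simp [pvY, PySem.List.length_pyRange_one]
      omega
    · intro k h1 h2
      have hk : k < cs.length := by
        simpa [PySem.List.length_pyRange_one, hs] using h1
      rw [List.getElem_map, PySem.List.getElem_pyRange_one,
          pvUpd_getElem cs (pvY cs) s k (by simp [pvY, PySem.List.length_pyRange_one]) hk]
      rw [show (pvY cs)[k]'(by simp [pvY, PySem.List.length_pyRange_one]; exact hk)
            = pvEdgeUpto ((cs.length - 1 : Nat) : Int) ((0:Int) + (k:Int)) by
          simp only [pvY]
          rw [List.getElem_map, PySem.List.getElem_pyRange_one]]
      rw [hrow ((0:Int) + (k:Int))]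
      -- segment 1: reversed spine arcs
      have hseg1 : ((PySem.List.pyRange 0 (s - 1) 1).filter (fun i => i + 1 == (0:Int) + (k:Int)))
          = if 1 ≤ (0:Int) + (k:Int) ∧ (0:Int) + (k:Int) < s then [(0:Int) + (k:Int) - 1] else [] := by
        rw [List.filter_congr (fun i _ => show (i + 1 == (0:Int) + (k:Int))
              = (i == (0:Int) + (k:Int) - 1) by
            rw [Bool.eq_iff_iff]
            simp only [beq_iff_eq]
            omega),
          pvFilterRange 0 (s - 1) ((0:Int) + (k:Int) - 1)]
        by_cases hcnd : 0 ≤ (0:Int) + (k:Int) - 1 ∧ (0:Int) + (k:Int) - 1 < s - 1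
        · rw [if_pos hcnd, if_pos (by omega)]
        · rw [if_neg hcnd, if_neg (by omega)]
      -- segment 2: reversed leaf arcs — all firsts are ≥ s > v
      have hseg2 : ((LA.map (fun p => (p.2, p.1))).filter
          (fun p => p.1 == (0:Int) + (k:Int))) = [] := by
        apply List.filter_eq_nil_iff.mpr
        intro p hp
        obtain ⟨q, hq, rfl⟩ := List.mem_map.mp hp
        have := pvLeafA_mem cs 0 s q hpos hq
        simp
        omega
      -- segment 3: forward spine arcs
      have hseg3 : ((PySem.List.pyRange 0 (s - 1) 1).filter (fun i => i == (0:Int) + (k:Int)))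
          = if 0 ≤ (0:Int) + (k:Int) ∧ (0:Int) + (k:Int) < s - 1 then [(0:Int) + (k:Int)] else [] :=
        pvFilterRange 0 (s - 1) ((0:Int) + (k:Int))
      -- segment 4: forward leaf arcs of spine vertex k
      have hseg4 := pvLeafA_filter_fst cs 0 s k hk hpos
      have hpos_k : 0 ≤ (cs.take k).sum :=
        pvLeafSum_nonneg _ (fun d hd => hpos d (List.mem_of_mem_take hd))
      have hck : 0 ≤ cs[k] := hpos _ (by simp)
      have hmap4 : (((PySem.List.pyRange (s + (cs.take k).sum) (s + (cs.take k).sum + cs[k]) 1).map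
            (fun l => ((0:Int) + ((k:Nat):Int), l))).map (fun p => p.2))
          = PySem.List.pyRange (s + (cs.take k).sum) (s + (cs.take k).sum + cs[k]) 1 := by
        rw [List.map_map,
            show ((fun (p : Int × Int) => p.2) ∘ (fun l => ((0:Int) + ((k:Nat):Int), l)))
              = (fun (l : Int) => l) from rfl]
        exact List.map_id' _
      rw [hseg2, hseg1, hseg3, hseg4, List.map_nil, hmap4]
      -- both sides case-split on whether the spine vertex has a left/right neighbour;
      -- in each consistent case the assembled list is duplicate-free, so frozenset keeps it
      simp only [pvEdgeUpto]
      have hm1 : ((cs.length - 1 : Nat) : Int) = s - 1 := by rw [hs]; omega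
      have hks' : (0:Int) + (k:Int) < s := by rw [hs]; omega
      rw [hm1]
      split_ifs <;>
        first
          | (exfalso; omega)
          | ((try simp only [List.map_cons, List.map_nil, List.cons_append, List.nil_append,
               List.append_nil])
             first
               | exact PySem.Set.ofList_eq_self_of_nodup _ (pvNodup2 _ _ _ (by omega) (by omega))
               | exact PySem.Set.ofList_eq_self_of_nodup _ (pvNodupL _ _ _ (by omega))
               | exact PySem.Set.ofList_eq_self_of_nodup _ (pvNodupR _ _ _ (by omega))
               | exact PySem.Set.ofList_eq_self_of_nodup _ (PySem.List.nodup_pyRange_one _ _))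
  · -- leaf rows
    have := pvLeafRows cs 0 s hpos
    rw [← this]
    apply List.map_congr_left
    intro v hv
    rw [PySem.List.mem_pyRange_one] at hv
    rw [hrow v]
    have hseg1 : ((PySem.List.pyRange 0 (s - 1) 1).filter (fun i => i + 1 == v)) = [] := by
      apply List.filter_eq_nil_iff.mpr
      intro i hi
      rw [PySem.List.mem_pyRange_one] at hi
      simp
      omega
    have hseg3 : ((PySem.List.pyRange 0 (s - 1) 1).filter (fun i => i == v)) = [] := by
      apply List.filter_eq_nil_iff.mpr
      intro i hi
      rw [PySem.List.mem_pyRange_one] at hi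
      simp
      omega
    have hseg4 : (LA.filter (fun p => p.1 == v)) = [] := by
      apply List.filter_eq_nil_iff.mpr
      intro p hp
      have := pvLeafA_mem cs 0 s p hpos hp
      simp
      omega
    rw [hseg1, hseg3, hseg4, hLA]
    simp

-- ===== VERDICT (by name: the statement is the Claim_ definition above) =====
theorem make_caterpillar_graph_spec : Claim_equal_make_caterpillar_graph := by
  intro spine_length leaf_counts _hdom hpre
  unfold Spec_make_caterpillar_graph
  obtain ⟨h0, hlen, hpos⟩ := hpre
  subst hlen
  by_cases hn : leaf_counts.length = 0
  · have hcs : leaf_counts = [] := List.eq_nil_of_length_eq_zero hn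
    subst hcs
    decide
  · rw [pvA_desc leaf_counts hpos hn, pvB_desc leaf_counts hpos hn]
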